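-- pv_equiv track=rewrite | github.com/AfekAharoni/TextAnalyzer | TextAnalyzer/task7_task8.py | __check_if_pair_connected
-- ===== SOURCE A (Python) =====
-- def __check_if_pair_connected(neighbors_dict: dict, first_person: str, second_person: str, maximal_distance: int) -> bool:
--     """
--     This function checks if two people are connected within the maximal distance
--     :param neighbors_dict: The neighbors list of the graph {person: [list of all neighbors (edges)]}
--     :param first_person: First person primary name
--     :param second_person: Second person primary name
--     :param maximal_distance: The maximum distance allowed
--     :return: True if connected within the maximal distance, False else
--     """
--     queue = []
--     # The queue data structure is a list of tuples, when the first element in the tuple is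
--     # the person name and the second element is the distance from the first person
--     # [(Name, distance)]
--     queue.append((first_person, 0)) # first defaultive value
--     already_visited = set() # set to ensure that won't be duplications
--     while len(queue) > 0:
--         currect_person, distance = queue[0]
--         del queue[0] # delete from the queue, because this iteration is running over this preson
--         if currect_person == second_person: # so there is a connection between first_person and second_person within the maximal distance
--             return True
--         if distance < maximal_distance: # can continue to run
--             if currect_person in neighbors_dict: # so maybe there will be another edge to continue with
--                 neighbors = neighbors_dict[currect_person]
--                 for neighbor in neighbors:
--                     if neighbor not in already_visited: # if didn't visited this 'node'
--                         already_visited.add(neighbor) # next iteration will visit this 'node', so add to the visited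
--                         queue.append((neighbor, distance + 1)) # append so the next iteration will run over this neighbor
--     return False
-- ===== SOURCE B (Python) =====
-- def __check_if_pair_connected(neighbors_dict: dict, first_person: str, second_person: str, maximal_distance: int) -> bool:
--     # Bounded transitive closure: grow the whole reachable set by one hop per round,
--     # stopping at the distance bound or at a fixpoint; no queue, no separate visited set.
--     reachable = {first_person}
--     steps = 0
--     while True:
--         if second_person in reachable:
--             return True
--         if steps >= maximal_distance:
--             return False
--         expanded = set(reachable)
--         for node in reachable:
--             for neighbor in neighbors_dict.get(node, ()):
--                 expanded.add(neighbor)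
--         if expanded == reachable:
--             return False
--         reachable = expanded
--         steps += 1
-- ===== Notes on version B (the rewrite author's own statement) =====
-- stated objective: alternative
-- what changed: Replaces the (node,distance)-tuple FIFO queue with its visited set by a bounded transitive-closure iteration: one reachable set grown by one hop per round until the target appears, the distance bound is hit, or the set stops growing.
import Mathlib
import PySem

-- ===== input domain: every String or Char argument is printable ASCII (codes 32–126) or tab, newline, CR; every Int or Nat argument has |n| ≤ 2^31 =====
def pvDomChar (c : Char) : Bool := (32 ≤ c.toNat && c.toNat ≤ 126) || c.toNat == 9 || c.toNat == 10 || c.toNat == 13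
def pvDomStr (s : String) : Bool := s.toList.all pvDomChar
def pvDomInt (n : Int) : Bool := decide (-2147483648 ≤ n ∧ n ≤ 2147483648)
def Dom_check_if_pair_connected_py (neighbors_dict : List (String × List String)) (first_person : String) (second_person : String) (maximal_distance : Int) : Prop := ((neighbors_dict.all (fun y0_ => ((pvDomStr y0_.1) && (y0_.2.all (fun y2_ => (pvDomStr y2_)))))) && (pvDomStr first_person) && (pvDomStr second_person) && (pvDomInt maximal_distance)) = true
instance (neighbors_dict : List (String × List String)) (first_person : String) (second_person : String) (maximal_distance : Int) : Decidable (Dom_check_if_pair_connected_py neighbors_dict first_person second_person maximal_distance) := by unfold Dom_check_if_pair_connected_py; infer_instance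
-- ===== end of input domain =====

-- B replaces A's (node,distance)-tuple FIFO queue + visited set by a bounded transitive-closure
-- iteration on one reachable set; same return value, no speed claim.

-- all neighbor strings that can ever be enqueued (for port A's termination measure)
def pvFlat (d : List (String × List String)) : List String := (d.map Prod.snd).flatten

-- number of universe elements not yet visited (termination measure component of port A)
def pvUnvis (flat : List String) (V : PySem.Set String) : Nat :=
  (flat.filter (fun x => !(PySem.Set.contains V x))).length

-- ===== PORT A =====
-- first-match association-list lookup = 'currect_person in neighbors_dict' / 'neighbors_dict[currect_person]'
def pvALookup (d : List (String × List String)) (p : String) : Option (List String) :=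
  (d.find? (fun kv => kv.1 == p)).map Prod.snd

-- A's inner 'for neighbor in neighbors' loop: state (queue, already_visited)
def pvAExpand (V : PySem.Set String) (q : List (String × Int)) (nbrs : List String) (dist : Int) :
    List (String × Int) × PySem.Set String :=
  nbrs.foldl (fun st nb =>
    if PySem.Set.contains st.2 nb then st
    else (st.1 ++ [(nb, dist + 1)], PySem.Set.add st.2 nb)) (q, V)

theorem pvFiltMono (V W : PySem.Set String)
    (hsub : ∀ x, PySem.Set.contains V x = true → PySem.Set.contains W x = true)
    (l : List String) :
    (l.filter (fun x => !(PySem.Set.contains W x))).length ≤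
      (l.filter (fun x => !(PySem.Set.contains V x))).length := by
  rw [← List.countP_eq_length_filter, ← List.countP_eq_length_filter]
  refine List.countP_mono_left ?_
  intro x _ h
  simp only [Bool.not_eq_eq_eq_not, Bool.not_true] at h ⊢
  cases hv : PySem.Set.contains V x
  · rfl
  · rw [hsub x hv] at h; cases h

theorem pvUnvis_add_lt (flat : List String) (V : PySem.Set String) (nb : String)
    (hmem : nb ∈ flat) (hnc : PySem.Set.contains V nb = false) :
    pvUnvis flat (PySem.Set.add V nb) < pvUnvis flat V := by
  unfold pvUnvis
  have hn : nb ∉ V := by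
    intro h; rw [(PySem.Set.contains_iff V nb).2 h] at hnc; cases hnc
  rw [PySem.Set.add_of_not_mem hn]
  obtain ⟨l1, l2, rfl⟩ := List.append_of_mem hmem
  have hsub : ∀ x, PySem.Set.contains V x = true → PySem.Set.contains (V ++ [nb]) x = true := by
    intro x h
    exact (PySem.Set.contains_iff (V ++ [nb]) x).2
      (List.mem_append_left _ ((PySem.Set.contains_iff V x).1 h))
  have h1 := pvFiltMono V (V ++ [nb]) hsub l1
  have h2 := pvFiltMono V (V ++ [nb]) hsub l2
  have hw : PySem.Set.contains (V ++ [nb]) nb = true :=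
    (PySem.Set.contains_iff _ nb).2 (by simp)
  simp only [List.filter_append, List.filter_cons, List.length_append]
  simp only [hw, hnc, Bool.not_true, Bool.not_false, Bool.false_eq_true, if_false, if_true,
    List.length_cons]
  omega

theorem pvAExpand_cons (V : PySem.Set String) (q : List (String × Int)) (nb : String)
    (nbrs : List String) (dist : Int) :
    pvAExpand V q (nb :: nbrs) dist =
      if nb ∈ V then pvAExpand V q nbrs dist
      else pvAExpand (PySem.Set.add V nb) (q ++ [(nb, dist + 1)]) nbrs dist := by
  simp only [pvAExpand, List.foldl_cons]
  by_cases h : nb ∈ V <;> simp [h, PySem.Set.add_eq_ite]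

theorem pvAExpand_measure (flat : List String) (nbrs : List String)
    (hsub : ∀ x ∈ nbrs, x ∈ flat) (q : List (String × Int)) (V : PySem.Set String) (dist : Int) :
    (pvAExpand V q nbrs dist).1.length + 2 * pvUnvis flat (pvAExpand V q nbrs dist).2 ≤
      q.length + 2 * pvUnvis flat V := by
  induction nbrs generalizing q V with
  | nil => simp [pvAExpand]
  | cons nb nbrs ih =>
    have hnb : nb ∈ flat := hsub nb (List.mem_cons_self ..)
    have hsub' : ∀ x ∈ nbrs, x ∈ flat := fun x hx => hsub x (List.mem_cons_of_mem _ hx)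
    rw [pvAExpand_cons]
    by_cases hc : nb ∈ V
    · simp only [hc, if_true]
      exact ih hsub' q V
    · simp only [hc, if_false]
      have := ih hsub' (q ++ [(nb, dist + 1)]) (PySem.Set.add V nb)
      have hlt := pvUnvis_add_lt flat V nb hnb (by
        cases h : PySem.Set.contains V nb
        · rfl
        · exact absurd ((PySem.Set.contains_iff V nb).1 h) hc)
      simp only [List.length_append, List.length_cons, List.length_nil] at this
      omega

theorem pvALookup_sub (d : List (String × List String)) (p : String) (nbrs : List String)
    (h : pvALookup d p = some nbrs) : ∀ x ∈ nbrs, x ∈ pvFlat d := by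
  intro x hx
  unfold pvALookup at h
  cases hf : d.find? (fun kv => kv.1 == p) with
  | none => rw [hf] at h; cases h
  | some kv =>
    rw [hf] at h
    simp only [Option.map_some, Option.some.injEq] at h
    have hkv : kv ∈ d := List.mem_of_find?_eq_some hf
    simp only [pvFlat, List.mem_flatten]
    exact ⟨kv.2, List.mem_map_of_mem hkv, h ▸ hx⟩

-- A's 'while len(queue) > 0' loop
def pvALoop (nd : List (String × List String)) (second : String) (maxd : Int) :
    List (String × Int) → PySem.Set String → Bool
  | [], _ => false
  | (p, dist) :: rest, V =>
    if p == second then true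
    else if dist < maxd then
      match hl : pvALookup nd p with
      | some nbrs =>
        pvALoop nd second maxd (pvAExpand V rest nbrs dist).1 (pvAExpand V rest nbrs dist).2
      | none => pvALoop nd second maxd rest V
    else pvALoop nd second maxd rest V
  termination_by q V => q.length + 2 * pvUnvis (pvFlat nd) V
  decreasing_by
  · have := pvAExpand_measure (pvFlat nd) nbrs (pvALookup_sub nd p nbrs hl) rest V dist
    simp only [List.length_cons]
    omega
  · simp only [List.length_cons]; omega
  · simp only [List.length_cons]; omega

def check_if_pair_connected_py (neighbors_dict : List (String × List String)) (first_person : String) (second_person : String) (maximal_distance : Int) : Bool :=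
  pvALoop neighbors_dict second_person maximal_distance [(first_person, 0)] PySem.Set.empty

-- ===== PORT B =====
-- 'neighbors_dict.get(node, ())'
def pvCGet (d : List (String × List String)) (node : String) : List String :=
  ((d.find? (fun kv => kv.1 == node)).map Prod.snd).getD []

-- B's two nested 'for' loops: expanded = set(reachable); add every neighbor of every member
def pvCExpand (nd : List (String × List String)) (R : PySem.Set String) : PySem.Set String :=
  R.foldl (fun acc node => (pvCGet nd node).foldl (fun a nb => PySem.Set.add a nb) acc) R

-- B's 'while True' loop
def pvCLoop (nd : List (String × List String)) (second : String) (maxd : Int)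
    (R : PySem.Set String) (steps : Int) : Bool :=
  if PySem.Set.contains R second then true
  else if maxd ≤ steps then false
  else if PySem.Set.equal (pvCExpand nd R) R then false
  else pvCLoop nd second maxd (pvCExpand nd R) (steps + 1)
  termination_by (maxd - steps).toNat
  decreasing_by omega

def check_if_pair_connected_py_alt (neighbors_dict : List (String × List String)) (first_person : String) (second_person : String) (maximal_distance : Int) : Bool :=
  pvCLoop neighbors_dict second_person maximal_distance (PySem.Set.ofList [first_person]) 0

-- ===== PRECONDITION & SPEC =====
def Spec_check_if_pair_connected_py (neighbors_dict : List (String × List String)) (first_person : String) (second_person : String) (maximal_distance : Int) (out : Bool) : Prop := out = check_if_pair_connected_py_alt neighbors_dict first_person second_person maximal_distance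
instance (neighbors_dict : List (String × List String)) (first_person : String) (second_person : String) (maximal_distance : Int) (out : Bool) : Decidable (Spec_check_if_pair_connected_py neighbors_dict first_person second_person maximal_distance out) := by unfold Spec_check_if_pair_connected_py; infer_instance

-- ===== CLAIM (what is proved, stated in full; the proofs are below) =====
def Claim_equal_check_if_pair_connected_py : Prop := ∀ (neighbors_dict : List (String × List String)) (first_person : String) (second_person : String) (maximal_distance : Int), Dom_check_if_pair_connected_py neighbors_dict first_person second_person maximal_distance → Spec_check_if_pair_connected_py neighbors_dict first_person second_person maximal_distance (check_if_pair_connected_py neighbors_dict first_person second_person maximal_distance)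

-- ===== LEMMAS AND PROOFS =====
-- Proof plan: A's queue BFS = a level-synchronous BFS (pvLevLoop, frontier + visited per level),
-- and the level BFS = B's closure iteration via a set invariant linking (frontier, visited) to
-- the reachable set.

-- level BFS inner scan over one neighbor list: state (next_level, visited)
def pvBScan (st : List String × PySem.Set String) (nbrs : List String) :
    List String × PySem.Set String :=
  nbrs.foldl (fun st2 nb =>
    if PySem.Set.contains st2.2 nb then st2
    else (st2.1 ++ [nb], PySem.Set.add st2.2 nb)) st

theorem pvBScan_cons (st : List String × PySem.Set String) (nb : String) (nbrs : List String) :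
    pvBScan st (nb :: nbrs) =
      if nb ∈ st.2 then pvBScan st nbrs
      else pvBScan (st.1 ++ [nb], PySem.Set.add st.2 nb) nbrs := by
  simp only [pvBScan, List.foldl_cons]
  by_cases h : nb ∈ st.2 <;> simp [h, PySem.Set.add_eq_ite]

theorem pvCGet_sub (nd : List (String × List String)) (node : String) :
    ∀ x ∈ pvCGet nd node, x ∈ pvFlat nd := by
  intro x hx
  unfold pvCGet at hx
  cases hf : nd.find? (fun kv => kv.1 == node) with
  | none => rw [hf] at hx; simp at hx
  | some kv =>
    rw [hf] at hx
    simp only [Option.map_some, Option.getD_some] at hx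
    simp only [pvFlat, List.mem_flatten]
    exact ⟨kv.2, List.mem_map_of_mem (List.mem_of_find?_eq_some hf), hx⟩

theorem pvBScan_measure (flat : List String) (nbrs : List String)
    (hsub : ∀ x ∈ nbrs, x ∈ flat) (l : List String) (V : PySem.Set String) :
    (pvBScan (l, V) nbrs).1.length + 2 * pvUnvis flat (pvBScan (l, V) nbrs).2 ≤
      l.length + 2 * pvUnvis flat V := by
  induction nbrs generalizing l V with
  | nil => simp [pvBScan]
  | cons nb nbrs ih =>
    have hnb : nb ∈ flat := hsub nb (List.mem_cons_self ..)
    have hsub' : ∀ x ∈ nbrs, x ∈ flat := fun x hx => hsub x (List.mem_cons_of_mem _ hx)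
    rw [pvBScan_cons]
    by_cases hc : nb ∈ V
    · simp only [hc, if_true]
      exact ih hsub' l V
    · simp only [hc, if_false]
      have := ih hsub' (l ++ [nb]) (PySem.Set.add V nb)
      have hlt := pvUnvis_add_lt flat V nb hnb (by
        cases h : PySem.Set.contains V nb
        · rfl
        · exact absurd ((PySem.Set.contains_iff V nb).1 h) hc)
      simp only [List.length_append, List.length_cons, List.length_nil] at this
      omega

theorem pvBFold_measure (nd : List (String × List String)) (current : List String) :
    ∀ (l : List String) (V : PySem.Set String),
      (current.foldl (fun st node => pvBScan st (pvCGet nd node)) (l, V)).1.length +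
        2 * pvUnvis (pvFlat nd)
          (current.foldl (fun st node => pvBScan st (pvCGet nd node)) (l, V)).2 ≤
      l.length + 2 * pvUnvis (pvFlat nd) V := by
  induction current with
  | nil => intro l V; simp
  | cons node current ih =>
    intro l V
    simp only [List.foldl_cons]
    have h1 := pvBScan_measure (pvFlat nd) (pvCGet nd node) (pvCGet_sub nd node) l V
    have h2 := ih (pvBScan (l, V) (pvCGet nd node)).1 (pvBScan (l, V) (pvCGet nd node)).2
    rw [Prod.mk.eta] at h2
    omega

-- level BFS: build the next frontier from the current one
def pvBNext (nd : List (String × List String)) (current : List String)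
    (V : PySem.Set String) : List String × PySem.Set String :=
  current.foldl (fun st node => pvBScan st (pvCGet nd node)) ([], V)

theorem pvBNext_measure (nd : List (String × List String)) (current : List String)
    (V : PySem.Set String) :
    (pvBNext nd current V).1.length + 2 * pvUnvis (pvFlat nd) (pvBNext nd current V).2 ≤
      2 * pvUnvis (pvFlat nd) V := by
  unfold pvBNext
  simpa using pvBFold_measure nd current [] V

-- level-synchronous BFS loop (proof intermediate between A's queue and B's closure)
def pvLevLoop (nd : List (String × List String)) (second : String) (maxd : Int)
    (current : List String) (V : PySem.Set String) (dist : Int) : Bool :=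
  if current.isEmpty then false
  else if current.contains second then true
  else if maxd ≤ dist then false
  else
    pvLevLoop nd second maxd (pvBNext nd current V).1 (pvBNext nd current V).2 (dist + 1)
  termination_by 2 * pvUnvis (pvFlat nd) V + current.length
  decreasing_by
    have := pvBNext_measure nd current V
    have hc : current ≠ [] := by
      rename_i h _ _; simpa [List.isEmpty_iff] using h
    have : 0 < current.length := List.length_pos_of_ne_nil hc
    omega

-- ===== Stage 1: A's queue BFS = level BFS =====

-- accumulator lemma for the inner scan
theorem pvBScan_acc (nbrs : List String) (l : List String) (V : PySem.Set String) :
    pvBScan (l, V) nbrs = (l ++ (pvBScan ([], V) nbrs).1, (pvBScan ([], V) nbrs).2) := by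
  induction nbrs generalizing l V with
  | nil => simp [pvBScan]
  | cons nb nbrs ih =>
    rw [pvBScan_cons, pvBScan_cons]
    by_cases hc : nb ∈ V
    · simp only [hc, if_true]
      exact ih l V
    · simp only [hc, if_false, List.nil_append]
      rw [ih (l ++ [nb]) (PySem.Set.add V nb), ih [nb] (PySem.Set.add V nb)]
      simp [List.append_assoc]

-- A's expansion is the inner scan with the distance tag attached
theorem pvAExpand_eq (nbrs : List String) (q : List (String × Int)) (V : PySem.Set String)
    (dist : Int) :
    pvAExpand V q nbrs dist =
      (q ++ (pvBScan ([], V) nbrs).1.map (fun s => (s, dist + 1)), (pvBScan ([], V) nbrs).2) := by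
  induction nbrs generalizing q V with
  | nil => simp [pvAExpand, pvBScan]
  | cons nb nbrs ih =>
    rw [pvAExpand_cons, pvBScan_cons]
    by_cases hc : nb ∈ V
    · simp only [hc, if_true]
      exact ih q V
    · simp only [hc, if_false, List.nil_append]
      rw [ih (q ++ [(nb, dist + 1)]) (PySem.Set.add V nb),
        pvBScan_acc nbrs [nb] (PySem.Set.add V nb)]
      simp [List.append_assoc]

-- if the target is in the level prefix, A's loop returns true whatever follows
theorem pvALoop_hit (nd : List (String × List String)) (second : String) (maxd : Int)
    (d : Int) (ps : List String) (rest : List (String × Int)) (V : PySem.Set String)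
    (h : ps.contains second = true) :
    pvALoop nd second maxd (ps.map (fun s => (s, d)) ++ rest) V = true := by
  induction ps generalizing rest V with
  | nil => simp at h
  | cons p ps ih =>
    by_cases hps : p = second
    · simp only [List.map_cons, List.cons_append, pvALoop, hps, beq_self_eq_true, if_true]
    · have h' : ps.contains second = true := by
        simp only [List.contains_cons, Bool.or_eq_true, beq_iff_eq] at h
        rcases h with hm | hm
        · exact absurd hm.symm hps
        · exact hm
      have hps' : (p == second) = false := by simp [hps]
      simp only [List.map_cons, List.cons_append, pvALoop, hps', Bool.false_eq_true, if_false]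
      by_cases hdm : d < maxd
      · simp only [hdm, if_true]
        cases hl : pvALookup nd p with
        | none => simp only [hl]; exact ih rest V h'
        | some nbrs =>
          simp only [hl]
          rw [pvAExpand_eq]
          rw [List.append_assoc]
          exact ih _ _ h'
      · simp only [hdm, if_false]
        exact ih rest V h'

-- past the distance bound, A's loop only tests membership
theorem pvALoop_far (nd : List (String × List String)) (second : String) (maxd : Int)
    (d : Int) (hd : maxd ≤ d) (ps : List String) (V : PySem.Set String) :
    pvALoop nd second maxd (ps.map (fun s => (s, d))) V = ps.contains second := by
  induction ps generalizing V with
  | nil => simp [pvALoop]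
  | cons p ps ih =>
    by_cases hps : p = second
    · simp only [List.map_cons, pvALoop, hps, beq_self_eq_true, if_true, List.contains_cons]
      simp
    · have hps' : (p == second) = false := by simp [hps]
      have hnd : ¬ d < maxd := not_lt.2 hd
      simp only [List.map_cons, pvALoop, hps', Bool.false_eq_true, if_false, hnd]
      rw [ih V]
      have hsp : (second == p) = false := by simp [Ne.symm hps]
      rw [List.contains_cons, hsp, Bool.false_or]

-- processing one whole level of A's queue = one step of the level fold
theorem pvALoop_level (nd : List (String × List String)) (second : String) (maxd : Int)
    (d : Int) (hd : d < maxd) (ps : List String) (qs : List String) (V : PySem.Set String)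
    (hcont : ps.contains second = false) :
    pvALoop nd second maxd (ps.map (fun s => (s, d)) ++ qs.map (fun s => (s, d + 1))) V =
      pvALoop nd second maxd
        ((ps.foldl (fun st node => pvBScan st (pvCGet nd node)) (qs, V)).1.map (fun s => (s, d + 1)))
        (ps.foldl (fun st node => pvBScan st (pvCGet nd node)) (qs, V)).2 := by
  induction ps generalizing qs V with
  | nil => simp
  | cons p ps ih =>
    have hps : p ≠ second := by
      intro he
      rw [List.contains_cons] at hcont
      simp [he] at hcont
    have h' : ps.contains second = false := by
      rw [List.contains_cons] at hcont
      exact (Bool.or_eq_false_iff.1 hcont).2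
    have hps' : (p == second) = false := by simp [hps]
    simp only [List.map_cons, List.cons_append, pvALoop, hps', Bool.false_eq_true, if_false,
      hd, if_true, List.foldl_cons]
    cases hl : pvALookup nd p with
    | none =>
      simp only [hl]
      have hg : pvCGet nd p = [] := by
        unfold pvCGet pvALookup at *
        rw [show (nd.find? (fun kv => kv.1 == p)).map Prod.snd = none from hl]
        rfl
      rw [hg]
      have hscan : pvBScan (qs, V) [] = (qs, V) := rfl
      rw [hscan]
      exact ih qs V h'
    | some nbrs =>
      simp only [hl]
      have hg : pvCGet nd p = nbrs := by
        unfold pvCGet pvALookup at *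
        rw [show (nd.find? (fun kv => kv.1 == p)).map Prod.snd = some nbrs from hl]
        rfl
      rw [hg]
      rw [pvAExpand_eq, pvBScan_acc nbrs qs V]
      rw [List.append_assoc, ← List.map_append]
      exact ih (qs ++ (pvBScan ([], V) nbrs).1) (pvBScan ([], V) nbrs).2 h'

theorem pvALoop_eq_lev (nd : List (String × List String)) (second : String) (maxd : Int)
    (current : List String) (V : PySem.Set String) (d : Int) :
    pvALoop nd second maxd (current.map (fun s => (s, d))) V =
      pvLevLoop nd second maxd current V d := by
  fun_induction pvLevLoop nd second maxd current V d with
  | case1 current V d hemp =>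
    have : current = [] := by simpa [List.isEmpty_iff] using hemp
    subst this
    simp [pvALoop]
  | case2 current V d hemp hcont =>
    have := pvALoop_hit nd second maxd d current [] V hcont
    simpa using this
  | case3 current V d hemp hcont hfar =>
    rw [pvALoop_far nd second maxd d hfar current V]
    simpa using hcont
  | case4 current V d hemp hcont hfar ih =>
    have hd : d < maxd := not_le.1 hfar
    have hlevel := pvALoop_level nd second maxd d hd current [] V (by simpa using hcont)
    simp only [List.map_nil, List.append_nil] at hlevel
    rw [hlevel]
    exact ih

-- ===== Stage 2: level BFS = B's closure iteration =====

-- membership in the inner scan's output: new frontier elements are unvisited neighbors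
theorem pvBScan_mem (nbrs : List String) (l V : List String) (x : String) :
    (x ∈ (pvBScan (l, V) nbrs).1 ↔ x ∈ l ∨ (x ∈ nbrs ∧ x ∉ V)) ∧
      (x ∈ (pvBScan (l, V) nbrs).2 ↔ x ∈ V ∨ x ∈ nbrs) := by
  induction nbrs generalizing l V with
  | nil => simp [pvBScan]
  | cons nb nbrs ih =>
    rw [pvBScan_cons]
    by_cases h : nb ∈ V
    · simp only [h, if_true]
      have hi := ih l V
      have hx : x = nb → x ∈ V := fun e => e ▸ h
      constructor
      · rw [hi.1]; simp only [List.mem_cons]; tauto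
      · rw [hi.2]; simp only [List.mem_cons]; tauto
    · simp only [h, if_false]
      have hi := ih (l ++ [nb]) (PySem.Set.add V nb)
      have hx : x = nb → x ∉ V := fun e => e ▸ h
      constructor
      · rw [hi.1]
        simp only [List.mem_append, List.mem_cons, PySem.Set.mem_add]
        tauto
      · rw [hi.2]
        simp only [List.mem_cons, PySem.Set.mem_add]
        tauto

theorem pvPropAux (P Q R S : Prop) :
    (P ∨ (Q ∧ ¬R)) ∨ (S ∧ ¬(R ∨ Q)) ↔ P ∨ ((Q ∨ S) ∧ ¬R) := by tauto

-- membership in the level fold's output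
theorem pvBFold_mem (nd : List (String × List String)) (F : List String) :
    ∀ (l V : List String) (x : String),
      (x ∈ (F.foldl (fun st node => pvBScan st (pvCGet nd node)) (l, V)).1 ↔
        x ∈ l ∨ ((∃ n ∈ F, x ∈ pvCGet nd n) ∧ x ∉ V)) ∧
      (x ∈ (F.foldl (fun st node => pvBScan st (pvCGet nd node)) (l, V)).2 ↔
        x ∈ V ∨ ∃ n ∈ F, x ∈ pvCGet nd n) := by
  induction F with
  | nil => intro l V x; simp
  | cons n F ih =>
    intro l V x
    simp only [List.foldl_cons]
    have hs := pvBScan_mem (pvCGet nd n) l V x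
    have hi := ih (pvBScan (l, V) (pvCGet nd n)).1 (pvBScan (l, V) (pvCGet nd n)).2 x
    rw [Prod.mk.eta] at hi
    have hcons : (∃ m ∈ n :: F, x ∈ pvCGet nd m) ↔
        x ∈ pvCGet nd n ∨ ∃ m ∈ F, x ∈ pvCGet nd m := by
      simp [List.mem_cons, exists_eq_or_imp]
    constructor
    · rw [hi.1]
      rw [hs.1]
      rw [hs.2]
      rw [hcons]
      exact pvPropAux _ _ _ _
    · rw [hi.2]
      rw [hs.2]
      rw [hcons]
      exact or_assoc

theorem pvBNext_mem1 (nd : List (String × List String)) (F V : List String) (x : String) :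
    x ∈ (pvBNext nd F V).1 ↔ (∃ n ∈ F, x ∈ pvCGet nd n) ∧ x ∉ V := by
  have := (pvBFold_mem nd F [] V x).1
  simpa [pvBNext] using this

theorem pvBNext_mem2 (nd : List (String × List String)) (F V : List String) (x : String) :
    x ∈ (pvBNext nd F V).2 ↔ x ∈ V ∨ ∃ n ∈ F, x ∈ pvCGet nd n := by
  have := (pvBFold_mem nd F [] V x).2
  simpa [pvBNext] using this

-- membership in B's expansion: the old set plus all its members' neighbors
theorem pvCExpand_mem (nd : List (String × List String)) (R : PySem.Set String) (x : String) :
    x ∈ pvCExpand nd R ↔ x ∈ R ∨ ∃ n ∈ R, x ∈ pvCGet nd n := by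
  unfold pvCExpand
  have haux : ∀ (L acc : List String),
      x ∈ L.foldl (fun acc node => (pvCGet nd node).foldl (fun a nb => PySem.Set.add a nb) acc) acc ↔
        x ∈ acc ∨ ∃ n ∈ L, x ∈ pvCGet nd n := by
    intro L
    induction L with
    | nil => intro acc; simp
    | cons n L ih =>
      intro acc
      simp only [List.foldl_cons]
      rw [ih]
      have hin : x ∈ (pvCGet nd n).foldl (fun a nb => PySem.Set.add a nb) acc ↔
          x ∈ acc ∨ x ∈ pvCGet nd n := by
        rw [PySem.Set.mem_foldl_add (f := fun nb => nb)]
        simp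
      rw [hin]
      simp only [List.mem_cons, exists_eq_or_imp]
      tauto
  exact haux R R

-- 'expanded == reachable' means the set is closed under neighbors
theorem pvCExpand_equal_iff (nd : List (String × List String)) (R : PySem.Set String) :
    PySem.Set.equal (pvCExpand nd R) R = true ↔ ∀ n ∈ R, ∀ x ∈ pvCGet nd n, x ∈ R := by
  rw [PySem.Set.equal_iff]
  constructor
  · intro h n hn x hx
    exact (h x).1 ((pvCExpand_mem nd R x).2 (Or.inr ⟨n, hn, hx⟩))
  · intro h x
    rw [pvCExpand_mem]
    constructor
    · rintro (hx | ⟨n, hn, hx⟩)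
      · exact hx
      · exact h n hn x hx
    · exact Or.inl

-- once the reachable set is closed and misses the target, the level BFS can never succeed
theorem pvLevLoop_false (nd : List (String × List String)) (second : String) (maxd : Int)
    (R : PySem.Set String) (hfix : ∀ n ∈ R, ∀ x ∈ pvCGet nd n, x ∈ R) (hs : second ∉ R) :
    ∀ (F : List String) (V : PySem.Set String) (d : Int),
      (∀ x ∈ F, x ∈ R) → pvLevLoop nd second maxd F V d = false := by
  intro F V d
  fun_induction pvLevLoop nd second maxd F V d with
  | case1 F V d hemp => intro _; rfl
  | case2 F V d hemp hcont =>
    intro hF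
    exact absurd (hF second (by simpa using hcont)) hs
  | case3 F V d hemp hcont hfar => intro _; rfl
  | case4 F V d hemp hcont hfar ih =>
    intro hF
    apply ih
    intro x hx
    obtain ⟨⟨n, hn, hxn⟩, _⟩ := (pvBNext_mem1 nd F V x).1 hx
    exact hfix n (hF n hn) x hxn

-- lockstep: one round of B's closure loop = one level of the level BFS, under the invariant
theorem pvLev_eq_clo (nd : List (String × List String)) (second : String) (maxd : Int)
    (R : PySem.Set String) (d : Int) :
    ∀ (F : List String) (V : PySem.Set String),
      (∀ x ∈ F, x ∈ R) → (∀ x ∈ V, x ∈ R) →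
      (∀ n ∈ R, n ∉ F → ∀ x ∈ pvCGet nd n, x ∈ R) → (second ∈ R → second ∈ F) →
      pvLevLoop nd second maxd F V d = pvCLoop nd second maxd R d := by
  fun_induction pvCLoop nd second maxd R d with
  | case1 R d hc =>
    intro F V h1 h2 h3 h4
    have hsF : second ∈ F := h4 ((PySem.Set.contains_iff R second).1 hc)
    have hne : F.isEmpty = false := by
      rcases F with _ | ⟨a, F⟩
      · cases hsF
      · rfl
    have hcF : F.contains second = true := by simpa using hsF
    rw [pvLevLoop.eq_def, hne, hcF]
    simp
  | case2 R d hc hfar =>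
    intro F V h1 h2 h3 h4
    have hsR : second ∉ R := fun h => by
      rw [(PySem.Set.contains_iff R second).2 h] at hc; exact hc rfl
    have hcF : F.contains second = false := by
      simp only [List.contains_eq_mem, decide_eq_false_iff_not]
      exact fun h => hsR (h1 second h)
    rw [pvLevLoop.eq_def, hcF]
    simp [hfar]
  | case3 R d hc hfar heq =>
    intro F V h1 h2 h3 h4
    have hsR : second ∉ R := fun h => by
      rw [(PySem.Set.contains_iff R second).2 h] at hc; exact hc rfl
    exact pvLevLoop_false nd second maxd R ((pvCExpand_equal_iff nd R).1 heq) hsR F V d h1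
  | case4 R d hc hfar heq ih =>
    intro F V h1 h2 h3 h4
    have hsR : second ∉ R := fun h => by
      rw [(PySem.Set.contains_iff R second).2 h] at hc; exact hc rfl
    -- F is nonempty: otherwise R would already be closed, contradicting 'heq'
    have hne : F ≠ [] := by
      intro hFnil
      apply heq
      exact (pvCExpand_equal_iff nd R).2 (fun n hn => h3 n hn (by simp [hFnil]))
    have hcF : F.contains second = false := by
      simp only [List.contains_eq_mem, decide_eq_false_iff_not]
      exact fun h => hsR (h1 second h)
    have hne' : F.isEmpty = false := by
      rcases F with _ | ⟨a, F⟩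
      · exact absurd rfl hne
      · rfl
    rw [pvLevLoop.eq_def, hne', hcF]
    simp only [Bool.false_eq_true, if_false, hfar]
    apply ih
    · -- new frontier ⊆ expanded set
      intro x hx
      obtain ⟨⟨n, hn, hxn⟩, _⟩ := (pvBNext_mem1 nd F V x).1 hx
      exact (pvCExpand_mem nd R x).2 (Or.inr ⟨n, h1 n hn, hxn⟩)
    · -- new visited ⊆ expanded set
      intro x hx
      rcases (pvBNext_mem2 nd F V x).1 hx with hv | ⟨n, hn, hxn⟩
      · exact (pvCExpand_mem nd R x).2 (Or.inl (h2 x hv))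
      · exact (pvCExpand_mem nd R x).2 (Or.inr ⟨n, h1 n hn, hxn⟩)
    · -- non-frontier members of the expanded set have their neighbors inside it
      intro n hn hnF x hx
      by_cases hnR : n ∈ R
      · exact (pvCExpand_mem nd R x).2 (Or.inr ⟨n, hnR, hx⟩)
      · exfalso
        rcases (pvCExpand_mem nd R n).1 hn with h | ⟨m, hm, hnm⟩
        · exact hnR h
        · have hmF : m ∈ F := by
            by_contra hmF
            exact hnR (h3 m hm hmF n hnm)
          have hnV : n ∉ V := fun hv => hnR (h2 n hv)
          exact hnF ((pvBNext_mem1 nd F V n).2 ⟨⟨m, hmF, hnm⟩, hnV⟩)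
    · -- the target, if in the expanded set, is in the new frontier
      intro hsE
      rcases (pvCExpand_mem nd R second).1 hsE with h | ⟨m, hm, hsm⟩
      · exact absurd h hsR
      have hmF : m ∈ F := by
        by_contra hmF
        exact hsR (h3 m hm hmF second hsm)
      have hsV : second ∉ V := fun hv => hsR (h2 second hv)
      exact (pvBNext_mem1 nd F V second).2 ⟨⟨m, hmF, hsm⟩, hsV⟩

-- ===== VERDICT (by name: the statement is the Claim_ definition above) =====
theorem check_if_pair_connected_py_spec : Claim_equal_check_if_pair_connected_py := by
  intro nd f s m _
  show check_if_pair_connected_py nd f s m = check_if_pair_connected_py_alt nd f s m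
  have h1 := pvALoop_eq_lev nd s m [f] PySem.Set.empty 0
  have hof : PySem.Set.ofList [f] = [f] := rfl
  have h2 := pvLev_eq_clo nd s m [f] 0 [f] PySem.Set.empty
    (fun x hx => hx) (fun x hx => by cases hx)
    (fun n hn hnF _ _ => absurd hn hnF) id
  simp only [check_if_pair_connected_py, check_if_pair_connected_py_alt, hof]
  rw [← h2, ← h1]
  rfl
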